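-- pv_equiv track=rewrite | github.com/gumblex/orizonhub | orizonhub/provider/irc.py | _line_wrap
-- ===== SOURCE A (Python) =====
-- def _line_wrap(lines, max_length):
--     for l in lines:
--         while len(l.encode('utf-8')) > max_length:
--             # max utf-8 byte length is 4
--             for ch in range(max_length//4, len(l)):
--                 if len(l[:ch].encode('utf-8')) > max_length:
--                     break
--             yield l[:ch-1]
--             l = l[ch-1:]
--         else:
--             if l:
--                 yield l
-- ===== SOURCE B (Python) =====
-- def _line_wrap(lines, max_length):
--     for l in lines:
--         chunk = ''
--         size = 0
--         for ch in l:
--             b = len(ch.encode('utf-8'))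
--             if size + b > max_length and chunk:
--                 yield chunk
--                 chunk, size = '', 0
--             chunk += ch
--             size += b
--         if chunk:
--             yield chunk
-- ===== Notes on version B (the rewrite author's own statement) =====
-- stated objective: simpler
-- what changed: B makes one pass over each line, accumulating the current chunk and its running byte count and emitting the chunk when the next character would overflow, instead of A's while-loop that re-encodes every prefix of the remaining string to find each cut point.
-- intended difference: On lines whose length exceeds max_length and is congruent to 1 modulo max_length (max_length >= 2), A's prefix scan exhausts without breaking when exactly max_length+1 characters remain and cuts one character short, yielding a max_length-1 chunk followed by a 2-character tail; B yields full max_length chunks and a 1-character tail, which is the intended greedy fill. — e.g. on _line_wrap(["abcde"], 2): A returns ["ab", "c", "de"], B returns ["ab", "cd", "e"]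
import Mathlib
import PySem

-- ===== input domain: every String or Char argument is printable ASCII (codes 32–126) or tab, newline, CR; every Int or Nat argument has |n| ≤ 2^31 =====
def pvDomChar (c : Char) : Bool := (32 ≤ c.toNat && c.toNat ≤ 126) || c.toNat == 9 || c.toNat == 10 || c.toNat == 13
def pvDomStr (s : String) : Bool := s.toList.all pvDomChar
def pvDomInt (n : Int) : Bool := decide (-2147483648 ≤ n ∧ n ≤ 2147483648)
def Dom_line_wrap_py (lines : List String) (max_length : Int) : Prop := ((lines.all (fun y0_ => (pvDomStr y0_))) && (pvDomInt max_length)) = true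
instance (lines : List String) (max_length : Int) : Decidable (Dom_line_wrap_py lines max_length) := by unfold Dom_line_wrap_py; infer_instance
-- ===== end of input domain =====

-- B makes one pass per line with a running byte count instead of A's re-encoding prefix scan per cut (objective: simpler);
-- on lines of length ≡ 1 (mod max_length) exceeding max_length, A's scan cuts one char short — stated as the intended difference D_ below.


-- ===== PORT A =====
-- A's `len(x.encode('utf-8'))` is ported as the character count: on the ASCII domain
-- (Dom_line_wrap_py) every character encodes to exactly one UTF-8 byte, so this is exact there.
-- `for ch in range(a, len(l)): if len(l[:ch]) > max_length: break`; value = final value of ch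
-- (0 is the Python-NameError default for an empty range; under Pre_ the range is never empty).
def pvForCh (r : List Int) (l : List Char) (mx : Int) (cur : Int) : Int :=
  match r with
  | [] => cur
  | ch :: rest =>
    if ((PySem.List.slice l none (some ch)).length : Int) > mx then ch
    else pvForCh rest l mx ch

-- A's `while` loop over one line; fuel only totalizes the divergent inputs excluded by Pre_.
def pvWhileA (fuel : Nat) (l : List Char) (mx : Int) (acc : List String) : List String :=
  match fuel with
  | 0 => acc
  | f + 1 =>
    if ((l.length : Int)) > mx then
      let ch := pvForCh (PySem.List.pyRange (PySem.Int.floordiv mx 4) (l.length : Int) 1) l mx 0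
      pvWhileA f (PySem.List.slice l (some (ch - 1)) none) mx
        (acc ++ [String.ofList (PySem.List.slice l none (some (ch - 1)))])
    else if l ≠ [] then acc ++ [String.ofList l] else acc

def line_wrap_py (lines : List String) (max_length : Int) : List String :=
  lines.foldl (fun acc l => pvWhileA (l.toList.length + 1) l.toList max_length acc) []

-- ===== PORT B =====
-- B's inner `for ch in l` body; `len(ch.encode('utf-8'))` is 1 for every character of the
-- ASCII domain (Dom_line_wrap_py), so the byte size b is ported as the literal 1 (exact there).
def pvStepB (mx : Int) (st : List String × List Char × Int) (c : Char) : List String × List Char × Int :=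
  if st.2.2 + 1 > mx ∧ st.2.1 ≠ [] then (st.1 ++ [String.ofList st.2.1], [c], 1)
  else (st.1, st.2.1 ++ [c], st.2.2 + 1)

-- one line of B: fold the chars, then emit the last chunk if nonempty
def pvLineB (mx : Int) (l : List Char) : List String :=
  let st := l.foldl (pvStepB mx) ([], [], 0)
  if st.2.1 ≠ [] then st.1 ++ [String.ofList st.2.1] else st.1

def line_wrap_py_alt (lines : List String) (max_length : Int) : List String :=
  lines.flatMap (fun l => pvLineB max_length l.toList)

-- ===== PRECONDITION & SPEC =====
-- Pre_ excludes exactly the inputs on which A never returns (infinite loop): max_length < 2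
-- together with a line longer than max_length, or max_length < 0 with any nonempty line.
def Pre_line_wrap_py (lines : List String) (max_length : Int) : Prop :=
  2 ≤ max_length ∨ lines = [] ∨
    (0 ≤ max_length ∧ ∀ l ∈ lines, (l.toList.length : Int) ≤ max_length)
instance (lines : List String) (max_length : Int) : Decidable (Pre_line_wrap_py lines max_length) := by
  unfold Pre_line_wrap_py; infer_instance

def pvWitness_line_wrap_py : List String × Int := (["hello world", "x"], 4)

-- On lines whose length exceeds max_length and is ≡ 1 (mod max_length), A's prefix scan exhausts
-- without breaking when exactly max_length+1 characters remain and cuts one character short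
-- (a max_length-1 chunk then a 2-character tail); B yields full max_length chunks and a
-- 1-character tail, the intended greedy fill.
def D_line_wrap_py (lines : List String) (max_length : Int) : Prop :=
  2 ≤ max_length ∧ ∃ l ∈ lines,
    max_length < (l.toList.length : Int) ∧ (l.toList.length : Int) % max_length = 1
instance (lines : List String) (max_length : Int) : Decidable (D_line_wrap_py lines max_length) := by
  unfold D_line_wrap_py; infer_instance

def Spec_line_wrap_py (lines : List String) (max_length : Int) (out : List String) : Prop := ¬ D_line_wrap_py lines max_length → out = line_wrap_py_alt lines max_length
instance (lines : List String) (max_length : Int) (out : List String) : Decidable (Spec_line_wrap_py lines max_length out) := by unfold Spec_line_wrap_py; infer_instance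

def pvDiffWitness_line_wrap_py : List String × Int := (["abcde"], 2)
def pvDiffWitnessOut_line_wrap_py : (List String) × (List String) := (["ab", "c", "de"], ["ab", "cd", "e"])

-- ===== CLAIM (what is proved, stated in full; the proofs are below) =====
def Claim_unchanged_line_wrap_py : Prop := ∀ (lines : List String) (max_length : Int), Dom_line_wrap_py lines max_length → Pre_line_wrap_py lines max_length → Spec_line_wrap_py lines max_length (line_wrap_py lines max_length)
def Claim_changed_line_wrap_py : Prop := Dom_line_wrap_py (pvDiffWitness_line_wrap_py.1) (pvDiffWitness_line_wrap_py.2) ∧ Pre_line_wrap_py (pvDiffWitness_line_wrap_py.1) (pvDiffWitness_line_wrap_py.2) ∧ D_line_wrap_py (pvDiffWitness_line_wrap_py.1) (pvDiffWitness_line_wrap_py.2) ∧ line_wrap_py (pvDiffWitness_line_wrap_py.1) (pvDiffWitness_line_wrap_py.2) = pvDiffWitnessOut_line_wrap_py.1 ∧ line_wrap_py_alt (pvDiffWitness_line_wrap_py.1) (pvDiffWitness_line_wrap_py.2) = pvDiffWitnessOut_line_wrap_py.2 ∧ pvDiffWitnessOut_line_wrap_py.1 ≠ pvDiffWitnessO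ut_line_wrap_py.2
def Claim_exact_line_wrap_py : Prop := ∀ (lines : List String) (max_length : Int), Dom_line_wrap_py lines max_length → Pre_line_wrap_py lines max_length → D_line_wrap_py lines max_length → line_wrap_py lines max_length ≠ line_wrap_py_alt lines max_length

-- ===== LEMMAS AND PROOFS =====

-- proof-side characterization of A's per-line loop: cut max_length chars, or max_length-1
-- when exactly max_length+1 remain (A's quirk); fuel as in pvWhileA.
def pvWrapA (fuel : Nat) (l : List Char) (i : Int) (mx : Int) : List String :=
  match fuel with
  | 0 => []
  | f + 1 =>
    if (l.length : Int) - i > mx then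
      let cut := if (l.length : Int) - i ≠ mx + 1 then mx else mx - 1
      String.ofList (PySem.List.slice l (some i) (some (i + cut))) :: pvWrapA f l (i + cut) mx
    else [String.ofList (PySem.List.slice l (some i) none)]

-- A's inner for-loop finds min (mx+1) (n-1).
theorem pvForCh_eq (k : Nat) : ∀ (a : Int) (l : List Char) (mx cur : Int),
    0 ≤ a → a ≤ mx + 1 → a < (l.length : Int) → mx < (l.length : Int) →
    k = ((l.length : Int) - a).toNat →
    pvForCh (PySem.List.pyRange a (l.length : Int) 1) l mx cur
      = min (mx + 1) ((l.length : Int) - 1) := by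
  induction k using Nat.strong_induction_on with
  | _ k IH =>
    intro a l mx cur ha0 hamx han hmxn hk
    rw [PySem.List.pyRange_one_cons han]
    unfold pvForCh
    have hslice : PySem.List.slice l none (some a) = l.take a.toNat :=
      PySem.List.slice_to l ha0
    have hlen : ((PySem.List.slice l none (some a)).length : Int) = a := by
      rw [hslice]; simp [List.length_take]; omega
    rw [hlen]
    by_cases hbrk : a > mx
    · rw [if_pos hbrk]; omega
    · rw [if_neg hbrk]
      by_cases hlast : a + 1 < (l.length : Int)
      · exact IH ((l.length : Int) - (a+1)).toNat (by omega) (a+1) l mx a (by omega)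
          (by omega) hlast hmxn rfl
      · have : (l.length : Int) = a + 1 := by omega
        rw [this, PySem.List.pyRange_one_eq_nil (by omega)]
        unfold pvForCh
        omega

theorem pvWhileA_acc (fuel : Nat) : ∀ (l : List Char) (mx : Int) (acc : List String),
    pvWhileA fuel l mx acc = acc ++ pvWhileA fuel l mx [] := by
  induction fuel with
  | zero => intro l mx acc; simp [pvWhileA]
  | succ f IH =>
    intro l mx acc
    unfold pvWhileA
    by_cases hg : ((l.length : Int)) > mx
    · rw [if_pos hg, if_pos hg]
      simp only [List.nil_append]
      rw [IH]
      conv_rhs => rw [IH]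
      simp [List.append_assoc]
    · rw [if_neg hg, if_neg hg]
      by_cases hne : l ≠ []
      · simp [hne]
      · simp [hne]

theorem pvWrapA_shift (fuel : Nat) : ∀ (l : List Char) (i : Nat) (mx : Int),
    2 ≤ mx → i ≤ l.length →
    pvWrapA fuel l (i : Int) mx = pvWrapA fuel (l.drop i) 0 mx := by
  induction fuel with
  | zero => intro l i mx _ _; simp [pvWrapA]
  | succ f IH =>
    intro l i mx hmx hi
    have hdl : ((l.drop i).length : Int) = (l.length : Int) - i := by
      simp [List.length_drop]; omega
    unfold pvWrapA
    by_cases hg : (l.length : Int) - (i : Int) > mx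
    · rw [if_pos hg, if_pos (by omega : ((l.drop i).length : Int) - 0 > mx)]
      set cut : Int := if (l.length : Int) - (i:Int) ≠ mx + 1 then mx else mx - 1 with hcutdef
      have hcb : 1 ≤ cut ∧ cut ≤ mx := by
        rw [hcutdef]; split_ifs <;> omega
      have hcn : cut = ((cut.toNat : Nat) : Int) := by omega
      have hchunk : PySem.List.slice l (some (i:Int)) (some ((i:Int) + cut))
          = PySem.List.slice (l.drop i) (some (0:Int)) (some (0 + cut)) := by
        rw [PySem.List.slice_toNat l (by omega) (by omega),
            PySem.List.slice_toNat (l.drop i) (by omega) (by omega)]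
        simp only [Int.toNat_natCast, Int.toNat_zero, List.drop_zero]
        norm_num
        congr 1
        omega
      have htail : pvWrapA f l ((i:Int) + cut) mx = pvWrapA f (l.drop i) (0 + cut) mx := by
        have h1 : (i:Int) + cut = ((i + cut.toNat : Nat) : Int) := by push_cast; omega
        have h2 : (0:Int) + cut = ((cut.toNat : Nat) : Int) := by omega
        rw [h1, h2, IH l (i + cut.toNat) mx hmx (by omega),
            IH (l.drop i) cut.toNat mx hmx (by rw [List.length_drop]; omega)]
        rw [List.drop_drop]
      have hcut2 : (if ((l.drop i).length : Int) - 0 ≠ mx + 1 then mx else mx - 1) = cut := by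
        rw [hcutdef]
        by_cases h : (l.length : Int) - (i:Int) = mx + 1
        · rw [if_neg (by omega), if_neg (by omega)]
        · rw [if_pos (by omega), if_pos (by omega)]
      simp only [hcut2]
      rw [hchunk, htail]
    · rw [if_neg hg, if_neg (by omega : ¬ (((l.drop i).length : Int) - 0 > mx))]
      rw [PySem.List.slice_from l (by omega : (0:Int) ≤ (i:Int)),
          PySem.List.slice_from (l.drop i) (by omega : (0:Int) ≤ 0)]
      simp

theorem pvLine_eq (fuel : Nat) : ∀ (l : List Char) (mx : Int),
    2 ≤ mx → l.length < fuel → mx < (l.length : Int) →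
    pvWhileA fuel l mx [] = pvWrapA fuel l 0 mx := by
  induction fuel with
  | zero => intro l mx _ h _; omega
  | succ f IH =>
    intro l mx hmx hf hlen
    unfold pvWhileA pvWrapA
    rw [if_pos (by omega : ((l.length : Int)) > mx),
        if_pos (by omega : (l.length : Int) - 0 > mx)]
    simp only [List.nil_append]
    have ha : PySem.Int.floordiv mx 4 = mx / 4 := PySem.Int.floordiv_eq_ediv_of_pos (by omega)
    have hch : pvForCh (PySem.List.pyRange (PySem.Int.floordiv mx 4) (l.length : Int) 1) l mx 0
        = min (mx + 1) ((l.length : Int) - 1) := by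
      rw [ha]
      exact pvForCh_eq ((l.length : Int) - mx / 4).toNat (mx / 4) l mx 0
        (by omega) (by omega) (by omega) hlen rfl
    rw [hch]
    set c : Int := min (mx + 1) ((l.length : Int) - 1) with hc
    have hcb : 1 ≤ c - 1 ∧ c - 1 ≤ mx ∧ c - 1 ≤ (l.length : Int) - 2 := by
      rw [hc]; omega
    have hcut : (if (l.length : Int) - 0 ≠ mx + 1 then mx else mx - 1) = c - 1 := by
      by_cases h : (l.length : Int) = mx + 1
      · rw [if_neg (by omega), hc]; omega
      · rw [if_pos (by omega), hc]; omega
    simp only [hcut, zero_add]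
    have hchunk : PySem.List.slice l none (some (c - 1))
        = PySem.List.slice l (some 0) (some (c - 1)) := by
      rw [PySem.List.slice_zero_start]
    rw [pvWhileA_acc, hchunk]
    -- tails
    have hrest : PySem.List.slice l (some (c - 1)) none = l.drop (c - 1).toNat :=
      PySem.List.slice_from l (by omega)
    have hshift : pvWrapA f l (c - 1) mx = pvWrapA f (l.drop (c - 1).toNat) 0 mx := by
      have h1 : c - 1 = (((c - 1).toNat : Nat) : Int) := by omega
      rw [h1]
      exact pvWrapA_shift f l (c - 1).toNat mx hmx (by omega)
    rw [hrest, hshift, List.singleton_append]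
    congr 1
    have hn' : (l.drop (c - 1).toNat).length = l.length - (c - 1).toNat := by
      rw [List.length_drop]
    have hdi : ((l.drop (c - 1).toNat).length : Int) = (l.length : Int) - (c - 1) := by
      rw [hn']; omega
    by_cases h2 : mx < ((l.drop (c - 1).toNat).length : Int)
    · exact IH _ mx hmx (by omega) h2
    · obtain ⟨f', rfl⟩ : ∃ f', f = f' + 1 := ⟨f - 1, by omega⟩
      unfold pvWhileA pvWrapA
      rw [if_neg (by omega : ¬ (((l.drop (c - 1).toNat).length : Int)) > mx),
          if_neg (by omega : ¬ (((l.drop (c - 1).toNat).length : Int) - 0 > mx))]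
      rw [if_pos (by
        intro hnil
        rw [hnil] at hdi
        simp at hdi
        omega)]
      rw [PySem.List.slice_zero_start, PySem.List.slice_none_none]
      simp

theorem pvFoldl_flat (mx : Int) (lines : List String) : ∀ (acc : List String),
    lines.foldl (fun acc l => pvWhileA (l.toList.length + 1) l.toList mx acc) acc
      = acc ++ lines.flatMap (fun l => pvWhileA (l.toList.length + 1) l.toList mx []) := by
  induction lines with
  | nil => intro acc; simp
  | cons l rest IH =>
    intro acc
    simp only [List.foldl_cons, List.flatMap_cons]
    rw [IH, pvWhileA_acc]
    simp [List.append_assoc]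

-- ---- B-side lemmas ----

theorem pvStepB_acc (mx : Int) : ∀ (cs : List Char) (out : List String) (ch : List Char) (s : Int),
    cs.foldl (pvStepB mx) (out, ch, s)
      = (out ++ (cs.foldl (pvStepB mx) ([], ch, s)).1, (cs.foldl (pvStepB mx) ([], ch, s)).2) := by
  intro cs
  induction cs with
  | nil => intro out ch s; simp
  | cons c cs IH =>
    intro out ch s
    simp only [List.foldl_cons, pvStepB]
    by_cases hc : s + 1 > mx ∧ ch ≠ []
    · rw [if_pos hc, if_pos hc]
      simp only [List.nil_append]
      rw [IH (out ++ [String.ofList ch]), IH [String.ofList ch]]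
      simp [List.append_assoc]
    · rw [if_neg hc, if_neg hc]
      rw [IH out, IH []]

theorem pvStepB_fill (mx : Int) : ∀ (cs ch : List Char) (out : List String),
    ((ch.length + cs.length : Nat) : Int) ≤ mx →
    cs.foldl (pvStepB mx) (out, ch, (ch.length : Int))
      = (out, ch ++ cs, ((ch.length + cs.length : Nat) : Int)) := by
  intro cs
  induction cs with
  | nil => intro ch out _; simp
  | cons c cs IH =>
    intro ch out hle
    simp only [List.foldl_cons]
    have hc : ¬ ((ch.length : Int) + 1 > mx ∧ ch ≠ []) := by
      intro ⟨h1, _⟩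
      simp only [List.length_cons] at hle
      push_cast at hle h1
      omega
    simp only [pvStepB]
    rw [if_neg hc]
    have h1 : (ch.length : Int) + 1 = (((ch ++ [c]).length : Nat) : Int) := by
      simp
    rw [h1, IH (ch ++ [c]) out (by
      simp only [List.length_append, List.length_cons, List.length_nil] at hle ⊢
      push_cast at hle ⊢; omega)]
    have h2 : (ch ++ [c]).length + cs.length = ch.length + (c :: cs).length := by
      simp; omega
    rw [List.append_assoc, List.singleton_append, h2]

theorem pvLineB_low (mx : Int) (l : List Char) (h : (l.length : Int) ≤ mx) :
    pvLineB mx l = if l = [] then [] else [String.ofList l] := by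
  unfold pvLineB
  have h0 : ((0 : Nat) : Int) = (([] : List Char).length : Int) := by simp
  have := pvStepB_fill mx l [] [] (by simpa using h)
  simp only [List.length_nil, Nat.cast_zero, List.nil_append, Nat.zero_add] at this
  rw [this]
  by_cases hne : l = []
  · simp [hne]
  · simp [hne]

theorem pvLineB_high (mx : Int) (l : List Char) (h1 : 1 ≤ mx) (h2 : mx < (l.length : Int)) :
    pvLineB mx l = String.ofList (l.take mx.toNat) :: pvLineB mx (l.drop mx.toNat) := by
  have hk : mx.toNat < l.length := by omega
  have hsplit : l = l.take mx.toNat ++ l.drop mx.toNat := (List.take_append_drop _ l).symm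
  obtain ⟨c, rest, hdrop⟩ : ∃ c rest, l.drop mx.toNat = c :: rest := by
    cases hd : l.drop mx.toNat with
    | nil => exfalso; have := congrArg List.length hd; simp [List.length_drop] at this; omega
    | cons c rest => exact ⟨c, rest, rfl⟩
  have htlen : (l.take mx.toNat).length = mx.toNat := by
    simp [List.length_take]; omega
  have htne : l.take mx.toNat ≠ [] := by
    intro h; have := congrArg List.length h; simp [htlen] at this; omega
  unfold pvLineB
  conv_lhs => rw [hsplit, hdrop]
  rw [List.foldl_append]
  have hfill : (l.take mx.toNat).foldl (pvStepB mx) ([], [], 0)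
      = ([], l.take mx.toNat, ((l.take mx.toNat).length : Int)) := by
    have := pvStepB_fill mx (l.take mx.toNat) [] [] (by simp [htlen]; omega)
    simpa using this
  rw [hfill]
  simp only [List.foldl_cons]
  have hstep1 : pvStepB mx ([], l.take mx.toNat, ((l.take mx.toNat).length : Int)) c
      = ([String.ofList (l.take mx.toNat)], [c], 1) := by
    simp only [pvStepB]
    rw [if_pos ⟨by rw [htlen]; omega, htne⟩]
    simp
  rw [hstep1]
  conv_rhs => rw [hdrop]
  simp only [List.foldl_cons]
  have hstep2 : pvStepB mx (([] : List String), ([] : List Char), (0 : Int)) c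
      = ([], [c], 1) := by
    simp only [pvStepB]
    rw [if_neg (by intro ⟨ha, hb⟩; simp at hb)]
    simp
  rw [hstep2]
  rw [pvStepB_acc mx rest [String.ofList (l.take mx.toNat)] [c] 1]
  set Y := rest.foldl (pvStepB mx) ([], [c], 1) with hY
  by_cases hy : Y.2.1 ≠ []
  · simp [hy]
  · simp [hy]

-- mod facts
theorem pv_mod_succ (mx : Int) (h : 2 ≤ mx) : (mx + 1) % mx = 1 := by
  have h1 : (1 + mx * 1) % mx = 1 % mx := Int.add_mul_emod_self_left 1 mx 1
  have h2 : (1:Int) % mx = 1 := Int.emod_eq_of_lt (by omega) (by omega)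
  have h3 : mx + 1 = 1 + mx * 1 := by ring
  rw [h3, h1, h2]

theorem pv_mod_sub (a mx : Int) : (a - mx) % mx = a % mx := by
  have h1 : (a + mx * (-1)) % mx = a % mx := Int.add_mul_emod_self_left a mx (-1)
  have h2 : a - mx = a + mx * (-1) := by ring
  rw [h2, h1]

-- A's characterization agrees with B's per line when the length is not ≡ 1 (mod mx)
theorem pvWrapA_eq_lineB (fuel : Nat) : ∀ (l : List Char) (mx : Int),
    2 ≤ mx → l.length < fuel → mx < (l.length : Int) → (l.length : Int) % mx ≠ 1 →
    pvWrapA fuel l 0 mx = pvLineB mx l := by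
  induction fuel with
  | zero => intro l mx _ h _ _; omega
  | succ f IH =>
    intro l mx hmx hf hlen hmod
    have hne1 : (l.length : Int) ≠ mx + 1 := by
      intro h; rw [h, pv_mod_succ mx hmx] at hmod; exact hmod rfl
    unfold pvWrapA
    rw [if_pos (by omega : (l.length : Int) - 0 > mx)]
    have hcut : (if (l.length : Int) - 0 ≠ mx + 1 then mx else mx - 1) = mx := by
      rw [if_pos (by omega)]
    simp only [hcut, zero_add]
    have hchunk : PySem.List.slice l (some 0) (some mx) = l.take mx.toNat := by
      rw [PySem.List.slice_zero_start]
      exact PySem.List.slice_to l (by omega)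
    have hshift : pvWrapA f l mx mx = pvWrapA f (l.drop mx.toNat) 0 mx := by
      have h1 := pvWrapA_shift f l mx.toNat mx hmx (by omega)
      rw [show ((mx.toNat : Nat) : Int) = mx by omega] at h1
      exact h1
    rw [hchunk, hshift, pvLineB_high mx l (by omega) hlen]
    congr 1
    have hdl : ((l.drop mx.toNat).length : Int) = (l.length : Int) - mx := by
      simp [List.length_drop]; omega
    have hdmod : ((l.drop mx.toNat).length : Int) % mx ≠ 1 := by
      rw [hdl, pv_mod_sub]; exact hmod
    by_cases h2 : mx < ((l.drop mx.toNat).length : Int)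
    · exact IH _ mx hmx (by omega) h2 hdmod
    · obtain ⟨f', rfl⟩ : ∃ f', f = f' + 1 := ⟨f - 1, by omega⟩
      unfold pvWrapA
      rw [if_neg (by omega : ¬ (((l.drop mx.toNat).length : Int) - 0 > mx))]
      rw [PySem.List.slice_zero_start, PySem.List.slice_none_none]
      rw [pvLineB_low mx _ (by omega)]
      rw [if_neg (by
        intro hnil
        have := congrArg List.length hnil
        simp at this
        omega)]

-- equal lengths per line, quirk or not
theorem pvWrapA_len (fuel : Nat) : ∀ (l : List Char) (mx : Int),
    2 ≤ mx → l.length < fuel → mx < (l.length : Int) →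
    (pvWrapA fuel l 0 mx).length = (pvLineB mx l).length := by
  induction fuel with
  | zero => intro l mx _ h _; omega
  | succ f IH =>
    intro l mx hmx hf hlen
    rw [pvLineB_high mx l (by omega) hlen]
    unfold pvWrapA
    rw [if_pos (by omega : (l.length : Int) - 0 > mx)]
    by_cases hq : (l.length : Int) = mx + 1
    · -- quirk: cut = mx - 1, A leaves a 2-char tail; B leaves a 1-char tail
      have hcut : (if (l.length : Int) - 0 ≠ mx + 1 then mx else mx - 1) = mx - 1 := by
        rw [if_neg (by omega)]
      simp only [hcut, zero_add]
      have hshift : pvWrapA f l (mx - 1) mx = pvWrapA f (l.drop (mx - 1).toNat) 0 mx := by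
        have h1 := pvWrapA_shift f l (mx - 1).toNat mx hmx (by omega)
        rw [show (((mx - 1).toNat : Nat) : Int) = mx - 1 by omega] at h1
        exact h1
      rw [hshift]
      simp only [List.length_cons]
      congr 1
      have hdcut : ((l.drop (mx - 1).toNat).length : Int) = (l.length : Int) - (mx - 1) := by
        simp [List.length_drop]; omega
      have hdmx : ((l.drop mx.toNat).length : Int) = (l.length : Int) - mx := by
        simp [List.length_drop]; omega
      obtain ⟨f', rfl⟩ : ∃ f', f = f' + 1 := ⟨f - 1, by omega⟩
      unfold pvWrapA
      rw [if_neg (by omega : ¬ (((l.drop (mx - 1).toNat).length : Int) - 0 > mx))]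
      rw [pvLineB_low mx _ (by omega)]
      rw [if_neg (by
        intro hnil
        have := congrArg List.length hnil
        simp at this
        omega)]
      simp
    · have hcut : (if (l.length : Int) - 0 ≠ mx + 1 then mx else mx - 1) = mx := by
        rw [if_pos (by omega)]
      simp only [hcut, zero_add]
      have hshift : pvWrapA f l mx mx = pvWrapA f (l.drop mx.toNat) 0 mx := by
        have h1 := pvWrapA_shift f l mx.toNat mx hmx (by omega)
        rw [show ((mx.toNat : Nat) : Int) = mx by omega] at h1
        exact h1
      rw [hshift]
      simp only [List.length_cons]
      congr 1
      have hdl : ((l.drop mx.toNat).length : Int) = (l.length : Int) - mx := by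
        simp [List.length_drop]; omega
      by_cases h2 : mx < ((l.drop mx.toNat).length : Int)
      · exact IH _ mx hmx (by omega) h2
      · obtain ⟨f', rfl⟩ : ∃ f', f = f' + 1 := ⟨f - 1, by omega⟩
        unfold pvWrapA
        rw [if_neg (by omega : ¬ (((l.drop mx.toNat).length : Int) - 0 > mx))]
        rw [pvLineB_low mx _ (by omega)]
        rw [if_neg (by
          intro hnil
          have := congrArg List.length hnil
          simp at this
          omega)]
        simp

-- inside the quirk, A and B differ on the line
theorem pvWrapA_ne_lineB (fuel : Nat) : ∀ (l : List Char) (mx : Int),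
    2 ≤ mx → l.length < fuel → mx < (l.length : Int) → (l.length : Int) % mx = 1 →
    pvWrapA fuel l 0 mx ≠ pvLineB mx l := by
  induction fuel with
  | zero => intro l mx _ h _ _; omega
  | succ f IH =>
    intro l mx hmx hf hlen hmod
    rw [pvLineB_high mx l (by omega) hlen]
    unfold pvWrapA
    rw [if_pos (by omega : (l.length : Int) - 0 > mx)]
    by_cases hq : (l.length : Int) = mx + 1
    · -- heads already differ: a (mx-1)-chunk vs an mx-chunk
      have hcut : (if (l.length : Int) - 0 ≠ mx + 1 then mx else mx - 1) = mx - 1 := by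
        rw [if_neg (by omega)]
      simp only [hcut, zero_add]
      intro heq
      have hhead := ((List.cons.injEq _ _ _ _).mp heq).1
      have hlen2 := congrArg (fun s => s.toList.length) hhead
      simp only [String.toList_ofList] at hlen2
      have hchunk : PySem.List.slice l (some 0) (some (mx - 1)) = l.take (mx - 1).toNat := by
        rw [PySem.List.slice_zero_start]
        exact PySem.List.slice_to l (by omega)
      rw [hchunk] at hlen2
      simp only [List.length_take] at hlen2
      omega
    · -- same head, tails differ by induction
      have hcut : (if (l.length : Int) - 0 ≠ mx + 1 then mx else mx - 1) = mx := by
        rw [if_pos (by omega)]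
      simp only [hcut, zero_add]
      have hq2 : 2 * mx + 1 ≤ (l.length : Int) := by
        have hdiv := Int.mul_ediv_add_emod (l.length : Int) mx
        rw [hmod] at hdiv
        set q := (l.length : Int) / mx with hqd
        have hq1 : 2 ≤ q := by
          by_contra hq1
          have hq1' : q ≤ 1 := by omega
          have h1 : mx * q ≤ mx * 1 := mul_le_mul_of_nonneg_left hq1' (by omega)
          have h2 : (l.length : Int) ≤ mx + 1 := by linarith
          omega
        have h2 : mx * 2 ≤ mx * q := mul_le_mul_of_nonneg_left hq1 (by omega)
        linarith
      intro heq
      have htail := ((List.cons.injEq _ _ _ _).mp heq).2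
      have hshift : pvWrapA f l mx mx = pvWrapA f (l.drop mx.toNat) 0 mx := by
        have h1 := pvWrapA_shift f l mx.toNat mx hmx (by omega)
        rw [show ((mx.toNat : Nat) : Int) = mx by omega] at h1
        exact h1
      rw [hshift] at htail
      have hdl : ((l.drop mx.toNat).length : Int) = (l.length : Int) - mx := by
        simp [List.length_drop]; omega
      exact IH (l.drop mx.toNat) mx hmx (by omega) (by omega)
        (by rw [hdl, pv_mod_sub]; exact hmod) htail

-- flatMaps with pointwise-equal lengths that differ somewhere differ
theorem pv_flatMap_ne {α : Type} (f g : α → List String) : ∀ (xs : List α),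
    (∀ x ∈ xs, (f x).length = (g x).length) → (∃ x ∈ xs, f x ≠ g x) →
    xs.flatMap f ≠ xs.flatMap g := by
  intro xs
  induction xs with
  | nil => rintro _ ⟨x, hx, _⟩; simp at hx
  | cons x xs IH =>
    rintro hlen ⟨y, hy, hne⟩ heq
    simp only [List.flatMap_cons] at heq
    obtain ⟨h1, h2⟩ := List.append_inj heq (hlen x (List.mem_cons_self))
    rcases List.mem_cons.mp hy with rfl | hy'
    · exact hne h1
    · exact IH (fun z hz => hlen z (List.mem_cons_of_mem _ hz)) ⟨y, hy', hne⟩ h2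

-- per-line equivalence outside the quirk, given the per-line consequence of Pre_
theorem pvPerLine (l : String) (mx : Int)
    (h : (2 ≤ mx ∧ ((l.toList.length : Int) ≤ mx ∨ (l.toList.length : Int) % mx ≠ 1))
         ∨ (0 ≤ mx ∧ (l.toList.length : Int) ≤ mx)) :
    pvWhileA (l.toList.length + 1) l.toList mx [] = pvLineB mx l.toList := by
  by_cases hs : (l.toList.length : Int) ≤ mx
  · have hmx0 : 0 ≤ mx := by rcases h with ⟨h2, _⟩ | ⟨h0, _⟩ <;> omega
    unfold pvWhileA
    rw [if_neg (by omega)]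
    rw [pvLineB_low mx _ hs]
    by_cases hne : l.toList = []
    · rw [if_neg (by simpa using hne), if_pos hne]
    · rw [if_pos (by simpa using hne), if_neg hne]
      simp
  · have hmx : 2 ≤ mx := by
      rcases h with ⟨h2, _⟩ | ⟨_, hle⟩
      · exact h2
      · omega
    have hmod : (l.toList.length : Int) % mx ≠ 1 := by
      rcases h with ⟨_, hor⟩ | ⟨_, hle⟩
      · rcases hor with h' | h'
        · omega
        · exact h'
      · omega
    rw [pvLine_eq _ _ _ hmx (by omega) (by omega)]
    exact pvWrapA_eq_lineB _ _ _ hmx (by omega) (by omega) hmod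

-- ===== VERDICT (by name: the statements are the Claim_ definitions above) =====
theorem line_wrap_py_spec : Claim_unchanged_line_wrap_py := by
  intro lines mx _ hpre
  unfold Spec_line_wrap_py
  intro hnD
  unfold line_wrap_py line_wrap_py_alt
  rw [pvFoldl_flat mx lines []]
  simp only [List.nil_append]
  apply List.flatMap_congr
  intro l hl
  apply pvPerLine
  rcases hpre with h | h | ⟨h0, hall⟩
  · -- mx ≥ 2: ¬D gives per-line no-quirk
    left
    refine ⟨h, ?_⟩
    by_cases hle : (l.toList.length : Int) ≤ mx
    · exact Or.inl hle
    · right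
      intro hmod
      exact hnD ⟨h, l, hl, by omega, hmod⟩
  · subst h; simp at hl
  · exact Or.inr ⟨h0, hall l hl⟩

theorem line_wrap_py_changed : Claim_changed_line_wrap_py := by
  unfold Claim_changed_line_wrap_py; decide

theorem line_wrap_py_tight : Claim_exact_line_wrap_py := by
  intro lines mx _ _ hD
  obtain ⟨hmx, l0, hl0, hlen0, hmod0⟩ := hD
  unfold line_wrap_py line_wrap_py_alt
  rw [pvFoldl_flat mx lines []]
  simp only [List.nil_append]
  apply pv_flatMap_ne
  · intro l _
    by_cases hle : (l.toList.length : Int) ≤ mx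
    · rw [pvPerLine l mx (Or.inl ⟨hmx, Or.inl hle⟩)]
    · rw [pvLine_eq _ _ _ hmx (by omega) (by omega)]
      exact pvWrapA_len _ _ _ hmx (by omega) (by omega)
  · refine ⟨l0, hl0, ?_⟩
    rw [pvLine_eq _ _ _ hmx (by omega) (by omega)]
    exact pvWrapA_ne_lineB _ _ _ hmx (by omega) (by omega) hmod0
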